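-- pv_equiv track=rewrite | github.com/dcclyde/coding_puzzles | codeforces/2022_02_12/B.py | solve
-- ===== SOURCE A (Python) =====
-- def solve(dat):
--     N = len(dat)
--     out = 0
--     for k, q in enumerate(dat):
--         val = 2 if q == 0 else 1
--         count = (k + 1) * (N - k)
--         out += val * count
--
--     return out
-- ===== SOURCE B (Python) =====
-- def solve(dat):
--     N = len(dat)
--     base = N * (N + 1) * (N + 2) // 6
--     corr = sum((k + 1) * (N - k) for k, q in enumerate(dat) if q == 0)
--     return base + corr
-- ===== Notes on version B (the rewrite author's own statement) =====
-- stated objective: faster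
-- what changed: Replaces A's single weighted-sum loop over all positions by the closed form N*(N+1)*(N+2)//6 for the uniform base weight plus a correction sum over zero positions only.
import Mathlib
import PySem

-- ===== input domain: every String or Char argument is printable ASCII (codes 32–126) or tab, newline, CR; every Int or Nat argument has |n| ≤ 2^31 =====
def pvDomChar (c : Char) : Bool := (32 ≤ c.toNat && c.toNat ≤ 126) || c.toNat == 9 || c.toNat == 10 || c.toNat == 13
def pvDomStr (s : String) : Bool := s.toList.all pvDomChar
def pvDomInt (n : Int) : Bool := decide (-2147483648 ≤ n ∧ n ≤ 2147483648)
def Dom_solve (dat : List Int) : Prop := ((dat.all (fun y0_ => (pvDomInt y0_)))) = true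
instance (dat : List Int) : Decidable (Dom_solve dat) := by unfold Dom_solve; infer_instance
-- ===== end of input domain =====

-- B computes the same value via the closed form N*(N+1)*(N+2)//6 plus a zeros-only correction sum (alternative decomposition, same O(n) cost).

-- ===== PORT A =====
def solve (dat : List Int) : Int :=
  let N : Int := dat.length
  (PySem.List.enumerate dat).foldl
    (fun out kq => out + (if kq.2 = 0 then 2 else 1) * ((kq.1 + 1) * (N - kq.1))) 0

-- ===== PORT B =====
def solve_alt (dat : List Int) : Int :=
  let N : Int := dat.length
  let base := PySem.Int.floordiv (N * (N + 1) * (N + 2)) 6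
  let corr := (((PySem.List.enumerate dat).filter (fun kq => kq.2 == 0)).map
      (fun kq => (kq.1 + 1) * (N - kq.1))).sum
  base + corr

-- ===== PRECONDITION & SPEC =====
def Spec_solve (dat : List Int) (out : Int) : Prop := out = solve_alt dat
instance (dat : List Int) (out : Int) : Decidable (Spec_solve dat out) := by unfold Spec_solve; infer_instance

-- ===== CLAIM (what is proved, stated in full; the proofs are below) =====
def Claim_equal_solve : Prop := ∀ (dat : List Int), Dom_solve dat → Spec_solve dat (solve dat)

-- ===== LEMMAS AND PROOFS =====

-- split the weighted summand: (2 or 1)*c = c + (0-or-c)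
theorem pv_sum_split (N : Int) (l : List (Int × Int)) :
    (l.map (fun kq => (if kq.2 = 0 then (2:Int) else 1) * ((kq.1 + 1) * (N - kq.1)))).sum
      = (l.map (fun kq => (kq.1 + 1) * (N - kq.1))).sum
        + ((l.filter (fun kq => kq.2 == 0)).map (fun kq => (kq.1 + 1) * (N - kq.1))).sum := by
  induction l with
  | nil => simp
  | cons p t ih =>
    by_cases h : p.2 = 0
    · simp only [List.map_cons, List.sum_cons, List.filter_cons, if_pos h,
        show (p.2 == 0) = true by simp [h], if_true, List.map_cons, List.sum_cons, ih]
      ring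
    · simp only [List.map_cons, List.sum_cons, List.filter_cons, if_neg h,
        show (p.2 == 0) = false by simp [h], Bool.false_eq_true, if_false, ih]
      ring

-- closed form for the full-weight sum over range n
theorem pv_sum_range (M : Int) (n : Nat) :
    6 * ((List.range n).map (fun (k : Nat) => ((k:Int) + 1) * (M - (k:Int)))).sum
      = 3*M*(n:Int)*((n:Int)-1) + 6*M*(n:Int) - ((n:Int)-1)*(n:Int)*(2*(n:Int)-1) - 3*(n:Int)*((n:Int)-1) := by
  induction n with
  | zero => simp
  | succ m ih =>
    rw [List.range_succ, List.map_append, List.sum_append]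
    simp only [List.map_cons, List.map_nil, List.sum_cons, List.sum_nil]
    push_cast
    push_cast at ih
    linear_combination ih

-- ===== VERDICT (by name: the statement is the Claim_ definition above) =====
theorem solve_spec : Claim_equal_solve := by
  intro dat _
  unfold Spec_solve solve solve_alt
  simp only []
  set N : Int := (dat.length : Int) with hN
  rw [PySem.List.foldl_add (g := fun kq : Int × Int => (if kq.2 = 0 then (2:Int) else 1) * ((kq.1 + 1) * (N - kq.1)))]
  rw [pv_sum_split]
  have hfst : (PySem.List.enumerate dat).map (fun kq : Int × Int => (kq.1 + 1) * (N - kq.1))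
      = (PySem.List.pyRange 0 (0 + dat.length) 1).map (fun k => (k + 1) * (N - k)) := by
    rw [← PySem.List.map_fst_enumerate (xs := dat) (s := 0), List.map_map]
    rfl
  have hfull : (PySem.List.enumerate dat).map (fun kq : Int × Int => (kq.1 + 1) * (N - kq.1))
      = (List.range dat.length).map (fun (k : Nat) => ((k:Int) + 1) * (N - (k:Int))) := by
    rw [hfst, PySem.List.pyRange_one, List.map_map]
    simp
  have hbase : PySem.Int.floordiv (N * (N + 1) * (N + 2)) 6
      = ((List.range dat.length).map (fun (k : Nat) => ((k:Int) + 1) * (N - (k:Int)))).sum := by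
    have h6 := pv_sum_range N dat.length
    have hprod : N * (N + 1) * (N + 2)
        = 6 * ((List.range dat.length).map (fun (k : Nat) => ((k:Int) + 1) * (N - (k:Int)))).sum := by
      rw [h6, hN]; ring
    rw [PySem.Int.floordiv_eq_ediv_of_pos (by norm_num), hprod,
      Int.mul_ediv_cancel_left _ (by norm_num : (6:Int) ≠ 0)]
  rw [hfull, hbase]
  exact zero_add _
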